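-- pv_equiv track=rewrite | github.com/charlie-serrano/ProjectEuler | MarkShaney/mark_shaney.py | create_triples_dictionary
-- ===== SOURCE A (Python) =====
-- def create_triples_dictionary(array):
--     triples_dictionary = {}
--
--     for i in range(len(array) - 2):
--         w1 = array[i]
--         w2 = array[i+1]
--         w3 = array[i+2]
--
--         if w1 not in triples_dictionary:
--             triples_dictionary[w1] = [(w2, w3)]
--         elif w1 in triples_dictionary and (w2, w3) in triples_dictionary[w1]:
--             continue
--         else:
--             triples_dictionary[w1].append((w2, w3))
--
--     return triples_dictionary
-- ===== SOURCE B (Python) =====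
-- def create_triples_dictionary(array):
--     # Group by repeated filtering: materialize the triple list, list the
--     # distinct leading words once, then for each key scan the whole triple
--     # list collecting its (w2, w3) pairs deduped to first occurrences.
--     triples = list(zip(array, array[1:], array[2:]))
--     keys = dict.fromkeys(w1 for w1, _, _ in triples)
--     return {k: list(dict.fromkeys((w2, w3) for w1, w2, w3 in triples if w1 == k))
--             for k in keys}
-- ===== Notes on version B (the rewrite author's own statement) =====
-- stated objective: alternative
-- what changed: Replaces A's single left-to-right pass that mutates a dict with a per-step membership test by a group-by-repeated-filtering strategy: materialize the triple list, compute the distinct keys once, then for each key filter the whole triple list and dedup its pairs to first occurrences; no incremental dict state at all (slower on key-rich inputs, a deliberate trade for the stateless decomposition).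
import Mathlib
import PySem

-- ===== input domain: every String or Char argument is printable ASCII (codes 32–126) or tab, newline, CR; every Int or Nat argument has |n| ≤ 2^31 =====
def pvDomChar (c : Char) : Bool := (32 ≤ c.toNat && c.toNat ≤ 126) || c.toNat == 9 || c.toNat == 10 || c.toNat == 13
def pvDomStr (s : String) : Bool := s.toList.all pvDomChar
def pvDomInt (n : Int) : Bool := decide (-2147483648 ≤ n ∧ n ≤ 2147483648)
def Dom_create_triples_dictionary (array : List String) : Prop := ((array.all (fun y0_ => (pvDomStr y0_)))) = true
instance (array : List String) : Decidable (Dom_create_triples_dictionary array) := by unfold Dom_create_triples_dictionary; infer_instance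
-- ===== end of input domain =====

-- B replaces A's single mutating-dict pass (per-step membership test) with a
-- group-by-repeated-filtering strategy: list the distinct keys once, then for each
-- key scan the whole triple list and dedup its pairs; no speed claim (B does one
-- full scan per distinct key, trading time for a stateless decomposition).

-- ===== PORT A =====
-- one index-loop step of A (branches in A's order); named so the proofs can refer to it
def pvStepA (array : List String) (d : PySem.Dict String (List (String × String)))
    (i : Int) : PySem.Dict String (List (String × String)) :=
  let w1 := PySem.List.pyGetD array i ""
  let w2 := PySem.List.pyGetD array (i + 1) ""
  let w3 := PySem.List.pyGetD array (i + 2) ""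
  if !(d.contains w1) then d.insert w1 [(w2, w3)]
  else if d.contains w1 && (d.getD w1 []).contains (w2, w3) then d
  else d.modify w1 [] (· ++ [(w2, w3)])

-- loop indices satisfy 0 ≤ i < len-2, so pyGetD with default "" is exact for array[i];
-- triples_dictionary[w1] is read only under 'w1 in triples_dictionary', so getD is exact
def create_triples_dictionary (array : List String) : List (String × List (String × String)) :=
  ((PySem.List.pyRange 0 ((array.length : Int) - 2) 1).foldl (pvStepA array)
    PySem.Dict.empty).items

-- ===== PORT B =====
def create_triples_dictionary_alt (array : List String) : List (String × List (String × String)) :=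
  -- zip(array, array[1:], array[2:]) as nested pairs (w1, (w2, w3))
  let triples := array.zip ((PySem.List.slice array (some 1) none).zip
                            (PySem.List.slice array (some 2) none))
  -- dict.fromkeys over the leading words: distinct keys, first-occurrence order
  let keys := PySem.List.dedup (triples.map (fun t => t.1))
  -- the dict comprehension: for each key, filter the triple list and dedup its pairs
  (keys.foldl (fun d k =>
      d.insert k (PySem.List.dedup ((triples.filter (fun t => t.1 == k)).map (fun t => t.2))))
    PySem.Dict.empty).items

-- ===== PRECONDITION & SPEC =====
def Spec_create_triples_dictionary (array : List String) (out : List (String × List (String × String))) : Prop := out = create_triples_dictionary_alt array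
instance (array : List String) (out : List (String × List (String × String))) : Decidable (Spec_create_triples_dictionary array out) := by unfold Spec_create_triples_dictionary; infer_instance

-- ===== CLAIM (what is proved, stated in full; the proofs are below) =====
def Claim_equal_create_triples_dictionary : Prop := ∀ (array : List String), Dom_create_triples_dictionary array → Spec_create_triples_dictionary array (create_triples_dictionary array)

-- ===== LEMMAS AND PROOFS =====

-- A's step re-expressed on a triple (w1, (w2, w3)) instead of an index
def pvStepAT (d : PySem.Dict String (List (String × String)))
    (t : String × (String × String)) : PySem.Dict String (List (String × String)) :=
  if !(d.contains t.1) then d.insert t.1 [t.2]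
  else if d.contains t.1 && (d.getD t.1 []).contains t.2 then d
  else d.modify t.1 [] (· ++ [t.2])

-- B's grouping, as a function of the triple list
def pvGroup (ts : List (String × (String × String))) : List (String × List (String × String)) :=
  (PySem.List.dedup (ts.map Prod.fst)).map
    (fun k => (k, PySem.List.dedup ((ts.filter (fun t => t.1 == k)).map Prod.snd)))

theorem pvDedup_append_singleton {α : Type} [BEq α] (l : List α) (x : α) :
    PySem.List.dedup (l ++ [x]) = PySem.Set.add (PySem.List.dedup l) x := by
  simp [PySem.List.dedup_eq_ofList, PySem.Set.ofList, List.foldl_append]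

theorem pvContains_group (ts : List (String × (String × String))) (x : String) :
    (PySem.Dict.mk (pvGroup ts)).contains x = decide (x ∈ ts.map Prod.fst) := by
  have h1 : (PySem.Dict.mk (pvGroup ts)).contains x
      = (PySem.List.dedup (ts.map Prod.fst)).any (fun k => k == x) := by
    simp [PySem.Dict.contains, pvGroup, List.any_map, Function.comp_def]
  rw [h1, List.any_beq']
  by_cases h : x ∈ ts.map Prod.fst
  · simp [h]
  · simp [h]

theorem pvKeys_group_nodup (ts : List (String × (String × String))) :
    (PySem.Dict.mk (pvGroup ts)).keys.Nodup := by
  have h1 : (PySem.Dict.mk (pvGroup ts)).keys = PySem.List.dedup (ts.map Prod.fst) := by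
    simp [PySem.Dict.keys, pvGroup, List.map_map, Function.comp_def]
  rw [h1]
  exact PySem.List.nodup_dedup _

theorem pvGetD_group (ts : List (String × (String × String))) (x : String)
    (hx : x ∈ ts.map Prod.fst) :
    (PySem.Dict.mk (pvGroup ts)).getD x [] =
      PySem.List.dedup ((ts.filter (fun t => t.1 == x)).map Prod.snd) := by
  have hmem : (x, PySem.List.dedup ((ts.filter (fun t => t.1 == x)).map Prod.snd)) ∈ pvGroup ts := by
    unfold pvGroup
    exact List.mem_map_of_mem ((PySem.List.mem_dedup _ _).2 hx)
  exact PySem.Dict.getD_of_mem_items (PySem.Dict.mk (pvGroup ts)) hmem (pvKeys_group_nodup ts) []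

-- core: one step of A on the grouped dict appends the triple to the group
theorem pvStep_group (q : List (String × (String × String))) (t : String × (String × String)) :
    pvStepAT (PySem.Dict.mk (pvGroup q)) t = PySem.Dict.mk (pvGroup (q ++ [t])) := by
  obtain ⟨k, p⟩ := t
  have hkeys : PySem.List.dedup ((q ++ [(k, p)]).map Prod.fst) =
      PySem.Set.add (PySem.List.dedup (q.map Prod.fst)) k := by
    rw [List.map_append]; exact pvDedup_append_singleton _ _
  by_cases hk : k ∈ q.map Prod.fst
  · have hcon : (PySem.Dict.mk (pvGroup q)).contains k = true := by
      rw [pvContains_group]; simpa using hk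
    have hctn : (PySem.List.dedup (q.map Prod.fst)).contains k = true :=
      List.contains_iff_mem.2 ((PySem.List.mem_dedup _ _).2 hk)
    have hadd : PySem.Set.add (PySem.List.dedup (q.map Prod.fst)) k =
        PySem.List.dedup (q.map Prod.fst) := by
      unfold PySem.Set.add PySem.Set.contains; rw [hctn]; simp
    have hgd : (PySem.Dict.mk (pvGroup q)).getD k [] =
        PySem.List.dedup ((q.filter (fun t => t.1 == k)).map Prod.snd) := pvGetD_group q k hk
    have hfilt : ∀ x : String, (q ++ [(k, p)]).filter (fun t => t.1 == x) =
        q.filter (fun t => t.1 == x) ++ if k == x then [(k, p)] else [] := by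
      intro x; rw [List.filter_append, List.filter_singleton]; cases h : (k == x) <;> simp
    by_cases hp : p ∈ (q.filter (fun t => t.1 == k)).map Prod.snd
    · -- the pair is already recorded: A skips, and the group is unchanged
      have hmemd : (PySem.List.dedup ((q.filter (fun t => t.1 == k)).map Prod.snd)).contains p = true :=
        List.contains_iff_mem.2 ((PySem.List.mem_dedup _ _).2 hp)
      have hL : pvStepAT (PySem.Dict.mk (pvGroup q)) (k, p) = PySem.Dict.mk (pvGroup q) := by
        simp only [pvStepAT]; rw [hcon, hgd, hmemd]; simp
      rw [hL]
      congr 1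
      unfold pvGroup
      rw [hkeys, hadd]
      apply List.map_congr_left
      intro x hxmem
      rw [hfilt x]
      by_cases hxk : k = x
      · subst hxk
        simp only [beq_self_eq_true, if_true, List.map_append, List.map_cons, List.map_nil]
        rw [pvDedup_append_singleton]
        unfold PySem.Set.add PySem.Set.contains
        rw [hmemd]; simp
      · simp [beq_eq_false_iff_ne.2 hxk]
    · -- a new pair for an existing key: A appends it, the group gains it at the end
      have hmemd : (PySem.List.dedup ((q.filter (fun t => t.1 == k)).map Prod.snd)).contains p = false := by
        rw [Bool.eq_false_iff]
        intro hc
        exact hp ((PySem.List.mem_dedup _ _).1 (List.contains_iff_mem.1 hc))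
      have hL : pvStepAT (PySem.Dict.mk (pvGroup q)) (k, p) =
          (PySem.Dict.mk (pvGroup q)).insert k
            (PySem.List.dedup ((q.filter (fun t => t.1 == k)).map Prod.snd) ++ [p]) := by
        simp only [pvStepAT]; rw [hcon, hgd, hmemd]
        simp [PySem.Dict.modify, hgd]
      rw [hL]
      apply PySem.Dict.ext
      rw [PySem.Dict.items_insert_of_contains _ _ hcon]
      show (pvGroup q).map _ = pvGroup (q ++ [(k, p)])
      unfold pvGroup
      rw [hkeys, hadd, List.map_map]
      apply List.map_congr_left
      intro x hxmem
      rw [hfilt x]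
      by_cases hxk : k = x
      · subst hxk
        simp only [Function.comp, beq_self_eq_true, if_true, List.map_append, List.map_cons,
          List.map_nil]
        rw [pvDedup_append_singleton]
        unfold PySem.Set.add PySem.Set.contains
        rw [hmemd]
        simp
      · have hne : (x == k) = false := beq_eq_false_iff_ne.2 (fun h => hxk h.symm)
        simp [Function.comp, hne, beq_eq_false_iff_ne.2 hxk]
  · -- fresh key: A inserts a one-pair list, the group gains a new row at the end
    have hcon : (PySem.Dict.mk (pvGroup q)).contains k = false := by
      rw [pvContains_group]; simpa using hk
    have hctn : (PySem.List.dedup (q.map Prod.fst)).contains k = false := by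
      rw [Bool.eq_false_iff]
      intro hc
      exact hk ((PySem.List.mem_dedup _ _).1 (List.contains_iff_mem.1 hc))
    have hadd : PySem.Set.add (PySem.List.dedup (q.map Prod.fst)) k =
        PySem.List.dedup (q.map Prod.fst) ++ [k] := by
      unfold PySem.Set.add PySem.Set.contains; rw [hctn]; simp
    have hfq : q.filter (fun t => t.1 == k) = [] := by
      rw [List.filter_eq_nil_iff]
      intro t ht
      simp only [beq_iff_eq]
      exact fun (h : t.1 = k) => hk (by rw [← h]; exact List.mem_map_of_mem ht)
    have hL : pvStepAT (PySem.Dict.mk (pvGroup q)) (k, p) =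
        (PySem.Dict.mk (pvGroup q)).insert k [p] := by
      simp only [pvStepAT]; rw [hcon]; simp
    rw [hL]
    apply PySem.Dict.ext
    rw [PySem.Dict.items_insert_of_not_contains _ _ hcon]
    show pvGroup q ++ [(k, [p])] = pvGroup (q ++ [(k, p)])
    unfold pvGroup
    rw [hkeys, hadd, List.map_append, List.map_singleton]
    congr 1
    · apply List.map_congr_left
      intro x hxmem
      have hxq : x ∈ q.map Prod.fst := (PySem.List.mem_dedup _ _).1 hxmem
      have hne : (k == x) = false :=
        beq_eq_false_iff_ne.2 (fun h => hk (by rw [h]; exact hxq))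
      rw [List.filter_append, List.filter_singleton]
      simp [hne]
    · rw [List.filter_append, hfq, List.filter_singleton]
      simp [PySem.List.dedup_eq_ofList, PySem.Set.ofList, PySem.Set.add, PySem.Set.contains]

theorem pvFoldA (ts : List (String × (String × String))) :
    ts.foldl pvStepAT PySem.Dict.empty = PySem.Dict.mk (pvGroup ts) := by
  induction ts using List.reverseRecOn with
  | nil => rfl
  | append_singleton q t ih =>
    rw [List.foldl_append, List.foldl_cons, List.foldl_nil, ih, pvStep_group]

-- the triples A's index loop reads are exactly B's zip of the three shifted lists
theorem pvTriples_eq (array : List String) :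
    (PySem.List.pyRange 0 ((array.length : Int) - 2) 1).map
      (fun i => (PySem.List.pyGetD array i "",
                 (PySem.List.pyGetD array (i + 1) "", PySem.List.pyGetD array (i + 2) ""))) =
    array.zip ((array.drop 1).zip (array.drop 2)) := by
  rcases Nat.lt_or_ge array.length 2 with h2 | h2
  · have h0 : PySem.List.pyRange 0 ((array.length : Int) - 2) 1 = [] :=
      PySem.List.pyRange_one_eq_nil (by omega)
    rw [h0]
    have hz : array.zip ((array.drop 1).zip (array.drop 2)) = [] :=
      List.length_eq_zero_iff.1 (by simp only [List.length_zip, List.length_drop]; omega)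
    rw [hz]
    rfl
  · obtain ⟨m, hm⟩ := Nat.exists_eq_add_of_le h2
    have hcast : ((array.length : Int) - 2) = (m : Int) := by
      rw [hm]; push_cast; ring
    rw [hcast, PySem.List.pyRange_zero_natCast, List.map_map]
    apply List.ext_getElem
    · simp [List.length_zip]
      omega
    · intro i hi1 hi2
      have him : i < m := by simpa using hi1
      have h1 : i + 1 < array.length := by omega
      have h2' : i + 2 < array.length := by omega
      have c1 : ((i : Int) + 1) = ((i + 1 : Nat) : Int) := by push_cast; ring
      have c2 : ((i : Int) + 2) = ((i + 2 : Nat) : Int) := by push_cast; ring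
      simp only [List.getElem_map, List.getElem_range, Function.comp, c1, c2,
        PySem.List.pyGetD_natCast, List.getElem_zip, List.getElem_drop]
      rw [List.getD_eq_getElem _ _ (by omega), List.getD_eq_getElem _ _ h1,
        List.getD_eq_getElem _ _ h2']
      simp [Nat.add_comm]

-- ===== VERDICT (by name: the statement is the Claim_ definition above) =====
theorem create_triples_dictionary_spec : Claim_equal_create_triples_dictionary := by
  intro array _
  show create_triples_dictionary array = create_triples_dictionary_alt array
  have hslice1 : PySem.List.slice array (some 1) none = array.drop 1 := by
    simpa using PySem.List.slice_from array (a := 1) (by norm_num)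
  have hslice2 : PySem.List.slice array (some 2) none = array.drop 2 := by
    simpa using PySem.List.slice_from array (a := 2) (by norm_num)
  have eA : create_triples_dictionary array =
      ((array.zip ((array.drop 1).zip (array.drop 2))).foldl pvStepAT PySem.Dict.empty).items := by
    unfold create_triples_dictionary
    rw [← pvTriples_eq array, List.foldl_map]
    rfl
  set ts := array.zip ((array.drop 1).zip (array.drop 2)) with hts
  have eB : create_triples_dictionary_alt array =
      ((PySem.List.dedup (ts.map Prod.fst)).foldl (fun d k =>
        d.insert k (PySem.List.dedup ((ts.filter (fun t => t.1 == k)).map Prod.snd)))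
        PySem.Dict.empty).items := by
    unfold create_triples_dictionary_alt
    rw [hslice1, hslice2]
  rw [eA, eB, pvFoldA]
  rw [PySem.Dict.items_foldl_insert_fresh (PySem.List.dedup (ts.map Prod.fst)) (fun k => k)
      (fun k => PySem.List.dedup ((ts.filter (fun t => t.1 == k)).map Prod.snd)) PySem.Dict.empty
      (fun a _ => PySem.Dict.contains_empty a)
      (by simp)]
  rfl
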